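-- pv_equiv track=rewrite | github.com/HaochenZhang717/RunCaptionForLaura | unlearning_codes/inference_on_test.py | find_human_and_gpt_text
-- ===== SOURCE A (Python) =====
-- def find_human_and_gpt_text(conversations):
--     user_text = None
--     assistant_text = None
--
--     for turn in conversations:
--         if turn["from"] == "human":
--             user_text = turn["value"]
--         elif turn["from"] == "gpt":
--             assistant_text = turn["value"]
--
--     if user_text is None:
--         user_text = "<image>"
--     if assistant_text is None:
--         assistant_text = ""
--
--     return user_text, assistant_text
-- ===== SOURCE B (Python) =====
-- def find_human_and_gpt_text(conversations):
--     user_text = None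
--     assistant_text = None
--
--     for turn in reversed(conversations):
--         if user_text is not None and assistant_text is not None:
--             break
--         role = turn["from"]
--         if role == "human":
--             if user_text is None:
--                 user_text = turn["value"]
--         elif role == "gpt":
--             if assistant_text is None:
--                 assistant_text = turn["value"]
--
--     return (user_text if user_text is not None else "<image>",
--             assistant_text if assistant_text is not None else "")
-- ===== Notes on version B (the rewrite author's own statement) =====
-- stated objective: alternative
-- what changed: B scans the conversation in reverse, keeping only not-yet-found slots and breaking out as soon as both the last human and last gpt texts are captured, instead of A's forward pass that overwrites both slots on every matching turn.
import Mathlib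
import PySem

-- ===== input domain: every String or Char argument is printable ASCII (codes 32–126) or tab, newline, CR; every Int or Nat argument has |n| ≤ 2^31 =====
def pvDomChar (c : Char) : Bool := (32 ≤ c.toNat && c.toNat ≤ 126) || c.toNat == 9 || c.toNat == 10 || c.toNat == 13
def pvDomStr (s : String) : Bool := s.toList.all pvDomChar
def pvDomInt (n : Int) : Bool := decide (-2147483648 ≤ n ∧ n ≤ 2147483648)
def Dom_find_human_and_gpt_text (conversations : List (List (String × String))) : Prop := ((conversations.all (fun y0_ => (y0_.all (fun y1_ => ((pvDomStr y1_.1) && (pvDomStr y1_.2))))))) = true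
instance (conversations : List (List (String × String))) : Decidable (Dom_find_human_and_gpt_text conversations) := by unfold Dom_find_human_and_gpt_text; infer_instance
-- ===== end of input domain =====

-- B replaces A's forward overwrite-both-slots pass by a reverse scan that fills each
-- slot at most once and stops as soon as both are found (objective: alternative).

-- ===== PORT A =====
-- one step of A's forward loop; the `none` branch of the "from" lookup is a KeyError
-- in Python and is excluded by Pre_ (the port leaves the state unchanged there)
def pvStepA (st : Option String × Option String) (turn : List (String × String)) :
    Option String × Option String :=
  match List.lookup "from" turn with
  | some f =>
      if f = "human" then (List.lookup "value" turn, st.2)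
      else if f = "gpt" then (st.1, List.lookup "value" turn)
      else st
  | none => st

def find_human_and_gpt_text (conversations : List (List (String × String))) : String × String :=
  let st := conversations.foldl pvStepA (none, none)
  (st.1.getD "<image>", st.2.getD "")

-- ===== PORT B =====
-- B's reverse loop: fill an empty slot on the first matching role, stop when both filled;
-- the `none` branch of the "from" lookup is a KeyError in Python, excluded by Pre_
def pvRevLoop : List (List (String × String)) → Option String → Option String →
    Option String × Option String
  | [], u, a => (u, a)
  | turn :: rest, u, a =>
    if u.isSome && a.isSome then (u, a)
    else
      match List.lookup "from" turn with
      | some f =>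
          if f = "human" then
            pvRevLoop rest (if u.isNone then List.lookup "value" turn else u) a
          else if f = "gpt" then
            pvRevLoop rest u (if a.isNone then List.lookup "value" turn else a)
          else pvRevLoop rest u a
      | none => pvRevLoop rest u a

def find_human_and_gpt_text_alt (conversations : List (List (String × String))) : String × String :=
  let st := pvRevLoop conversations.reverse none none
  (st.1.getD "<image>", st.2.getD "")

-- ===== PRECONDITION & SPEC =====
-- Pre_ excludes exactly the inputs where the Python A raises KeyError: a turn without a
-- "from" key, or a "human"/"gpt" turn without a "value" key.
def Pre_find_human_and_gpt_text (conversations : List (List (String × String))) : Prop :=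
  ∀ turn ∈ conversations,
    (List.lookup "from" turn).isSome = true ∧
    ((List.lookup "from" turn = some "human" ∨ List.lookup "from" turn = some "gpt") →
      (List.lookup "value" turn).isSome = true)
instance (conversations : List (List (String × String))) :
    Decidable (Pre_find_human_and_gpt_text conversations) := by
  unfold Pre_find_human_and_gpt_text; infer_instance

def pvWitness_find_human_and_gpt_text : (List (List (String × String))) :=
  [[("from", "human"), ("value", "hi")], [("from", "gpt"), ("value", "yo")]]

def Spec_find_human_and_gpt_text (conversations : List (List (String × String))) (out : String × String) : Prop := out = find_human_and_gpt_text_alt conversations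
instance (conversations : List (List (String × String))) (out : String × String) : Decidable (Spec_find_human_and_gpt_text conversations out) := by unfold Spec_find_human_and_gpt_text; infer_instance

-- ===== CLAIM (what is proved, stated in full; the proofs are below) =====
def Claim_equal_find_human_and_gpt_text : Prop := ∀ (conversations : List (List (String × String))), Dom_find_human_and_gpt_text conversations → Pre_find_human_and_gpt_text conversations → Spec_find_human_and_gpt_text conversations (find_human_and_gpt_text conversations)

-- ===== LEMMAS AND PROOFS =====

-- A's fold taken from the back (pvRevLoop consumes the reversed list, so this is the
-- natural shape to compare with)
def pvFoldBack (r : List (List (String × String))) : Option String × Option String :=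
  r.foldr (fun t s => pvStepA s t) (none, none)

theorem pvRevLoop_eq_or (r : List (List (String × String)))
    (hwf : ∀ turn ∈ r,
      (List.lookup "from" turn).isSome = true ∧
      ((List.lookup "from" turn = some "human" ∨ List.lookup "from" turn = some "gpt") →
        (List.lookup "value" turn).isSome = true)) :
    ∀ u a : Option String,
      pvRevLoop r u a = (u.or (pvFoldBack r).1, a.or (pvFoldBack r).2) := by
  induction r with
  | nil => intro u a; simp [pvRevLoop, pvFoldBack]
  | cons t rest ih =>
    intro u a
    have hwt := hwf t (by simp)
    have ih' := ih (fun turn hm => hwf turn (List.mem_cons_of_mem _ hm))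
    have hFB : pvFoldBack (t :: rest) = pvStepA (pvFoldBack rest) t := rfl
    rw [pvRevLoop, hFB]
    cases hf : List.lookup "from" t with
    | none => rw [hf] at hwt; simp at hwt
    | some f =>
      by_cases hh : f = "human"
      · subst hh
        obtain ⟨v, hv⟩ := Option.isSome_iff_exists.mp (hwt.2 (Or.inl hf))
        cases u <;> cases a <;> simp [hf, hv, ih', pvStepA]
      · by_cases hg : f = "gpt"
        · subst hg
          obtain ⟨v, hv⟩ := Option.isSome_iff_exists.mp (hwt.2 (Or.inr hf))
          cases u <;> cases a <;> simp [hf, hv, hh, ih', pvStepA]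
        · cases u <;> cases a <;> simp [hf, hh, hg, ih', pvStepA]

-- ===== VERDICT (by name: the statement is the Claim_ definition above) =====
theorem find_human_and_gpt_text_spec : Claim_equal_find_human_and_gpt_text := by
  intro conversations _hdom hpre
  unfold Spec_find_human_and_gpt_text find_human_and_gpt_text find_human_and_gpt_text_alt
  have hwf : ∀ turn ∈ conversations.reverse,
      (List.lookup "from" turn).isSome = true ∧
      ((List.lookup "from" turn = some "human" ∨ List.lookup "from" turn = some "gpt") →
        (List.lookup "value" turn).isSome = true) := by
    intro turn hm
    exact hpre turn (List.mem_reverse.mp hm)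
  rw [pvRevLoop_eq_or conversations.reverse hwf none none]
  have : pvFoldBack conversations.reverse = conversations.foldl pvStepA (none, none) := by
    simp [pvFoldBack, List.foldr_reverse]
  rw [this]
  simp [Option.none_or]
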